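-- pv_equiv track=rewrite | github.com/Medamineelkhattabi/tmpa-agent | backend/oracle_agent.py | _extract_steps_from_response
-- ===== SOURCE A (Python) =====
-- from typing import Dict, List, Optional, Any, Tuple
--
-- def _extract_steps_from_response(response: str) -> List[Dict[str, str]]:
--     """Extract steps from AI response text"""
--     steps = []
--     lines = response.split('\n')
--     current_step = None
--
--     for line in lines:
--         line = line.strip()
--         if not line:
--             continue
--
--         # Check for step indicators
--         if any(indicator in line.lower() for indicator in ['step 1', '1.', 'first']):
--             if current_step:
--                 steps.append(current_step)
--             current_step = {
--                 'title': line.replace('Step 1:', '').replace('1.', '').replace('First', '').strip(),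
--                 'description': '',
--                 'instructions': ''
--             }
--         elif any(indicator in line.lower() for indicator in ['step 2', '2.', 'second', 'then', 'next']):
--             if current_step:
--                 steps.append(current_step)
--             current_step = {
--                 'title': line.replace('Step 2:', '').replace('2.', '').replace('Second', '').replace('Then', '').replace('Next', '').strip(),
--                 'description': '',
--                 'instructions': ''
--             }
--         elif any(indicator in line.lower() for indicator in ['step 3', '3.', 'third', 'finally']):
--             if current_step:
--                 steps.append(current_step)
--             current_step = {
--                 'title': line.replace('Step 3:', '').replace('3.', '').replace('Third', '').replace('Finally', '').strip(),
--                 'description': '',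
--                 'instructions': ''
--             }
--         elif current_step:
--             # Add to current step description/instructions
--             if not current_step['description']:
--                 current_step['description'] = line
--             else:
--                 current_step['instructions'] += ' ' + line
--
--     if current_step:
--         steps.append(current_step)
--
--     return steps
-- ===== SOURCE B (Python) =====
-- from typing import Dict, List, Optional
--
-- def _title_of(line: str) -> Optional[str]:
--     low = line.lower()
--     if any(ind in low for ind in ('step 1', '1.', 'first')):
--         return line.replace('Step 1:', '').replace('1.', '').replace('First', '').strip()
--     if any(ind in low for ind in ('step 2', '2.', 'second', 'then', 'next')):
--         return line.replace('Step 2:', '').replace('2.', '').replace('Second', '').replace('Then', '').replace('Next', '').strip()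
--     if any(ind in low for ind in ('step 3', '3.', 'third', 'finally')):
--         return line.replace('Step 3:', '').replace('3.', '').replace('Third', '').replace('Finally', '').strip()
--     return None
--
-- def _extract_steps_from_response(response: str) -> List[Dict[str, str]]:
--     """Extract steps from AI response text, scanning the lines BACKWARDS:
--     collect the trailing body lines, and on each header line emit one
--     complete step at once (no mutable current-step with a flush)."""
--     steps: List[Dict[str, str]] = []
--     body: List[str] = []  # stripped non-empty body lines following the current position
--     for raw in reversed(response.split('\n')):
--         line = raw.strip()
--         if not line:
--             continue
--         title = _title_of(line)
--         if title is None: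
--             body = [line] + body
--         else:
--             steps = [{'title': title,
--                       'description': body[0] if body else '',
--                       'instructions': ''.join(' ' + l for l in body[1:])}] + steps
--             body = []
--     return steps
-- ===== Notes on version B (the rewrite author's own statement) =====
-- stated objective: alternative
-- what changed: Replaces A's forward scan with a mutable current-step dict that is flushed on the next header by a backward scan that collects the trailing body lines and emits each complete step at once (title, first body line as description, remaining body lines joined as instructions) when its header line is reached.
import Mathlib
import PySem

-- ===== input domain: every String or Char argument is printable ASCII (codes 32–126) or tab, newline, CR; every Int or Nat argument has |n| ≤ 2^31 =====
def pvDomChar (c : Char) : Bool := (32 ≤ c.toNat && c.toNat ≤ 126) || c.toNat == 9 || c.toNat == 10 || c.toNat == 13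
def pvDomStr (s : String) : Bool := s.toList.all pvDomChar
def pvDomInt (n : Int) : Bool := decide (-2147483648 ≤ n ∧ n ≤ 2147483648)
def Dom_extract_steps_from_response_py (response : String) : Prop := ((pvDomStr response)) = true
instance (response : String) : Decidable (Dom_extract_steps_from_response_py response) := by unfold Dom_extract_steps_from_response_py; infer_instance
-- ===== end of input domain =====

-- B scans the lines BACKWARDS, collecting the trailing body lines and emitting each complete
-- step at once on its header line — no mutable current-step dict with a flush (objective:
-- alternative); same return value everywhere.

-- ===== PORT A =====
-- per-line body of A (after line.strip()): the elif cascade with inline chained replaces,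
-- mutating the (steps, current_step) state forwards
def pvCoreA (steps : List (PySem.Dict String String)) (cur : Option (PySem.Dict String String))
    (line : String) : List (PySem.Dict String String) × Option (PySem.Dict String String) :=
  if line == "" then (steps, cur)
  else if (["step 1", "1.", "first"].any fun ind => PySem.Str.isIn ind (PySem.Str.lower line)) then
    (match cur with | some c => steps ++ [c] | none => steps,
     some ((((PySem.Dict.empty.insert "title"
        (PySem.Str.strip (PySem.Str.replace (PySem.Str.replace (PySem.Str.replace line
          "Step 1:" "") "1." "") "First" ""))).insert "description" "").insert "instructions" "")))
  else if (["step 2", "2.", "second", "then", "next"].any fun ind => PySem.Str.isIn ind (PySem.Str.lower line)) then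
    (match cur with | some c => steps ++ [c] | none => steps,
     some ((((PySem.Dict.empty.insert "title"
        (PySem.Str.strip (PySem.Str.replace (PySem.Str.replace (PySem.Str.replace (PySem.Str.replace (PySem.Str.replace line
          "Step 2:" "") "2." "") "Second" "") "Then" "") "Next" ""))).insert "description" "").insert "instructions" "")))
  else if (["step 3", "3.", "third", "finally"].any fun ind => PySem.Str.isIn ind (PySem.Str.lower line)) then
    (match cur with | some c => steps ++ [c] | none => steps,
     some ((((PySem.Dict.empty.insert "title"
        (PySem.Str.strip (PySem.Str.replace (PySem.Str.replace (PySem.Str.replace (PySem.Str.replace line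
          "Step 3:" "") "3." "") "Third" "") "Finally" ""))).insert "description" "").insert "instructions" "")))
  else
    match cur with
    | none => (steps, none)
    | some c =>
      if c.getD "description" "" == "" then (steps, some (c.insert "description" line))
      else (steps, some (c.modify "instructions" "" (fun v => v ++ (" " ++ line))))

def extract_steps_from_response_py (response : String) : List (List (String × String)) :=
  let lines := (PySem.Str.split? response "\n").getD []
  let fin := lines.foldl (fun acc rawLine => pvCoreA acc.1 acc.2 (PySem.Str.strip rawLine)) ([], none)
  let steps := match fin.2 with | some c => fin.1 ++ [c] | none => fin.1
  steps.map PySem.Dict.items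

-- ===== PORT B =====
-- Source B's _title_of: the step title if the line is a header line, else None
def pvTitleOf (line : String) : Option String :=
  if (["step 1", "1.", "first"].any fun ind => PySem.Str.isIn ind (PySem.Str.lower line)) then
    some (PySem.Str.strip (PySem.Str.replace (PySem.Str.replace (PySem.Str.replace line
      "Step 1:" "") "1." "") "First" ""))
  else if (["step 2", "2.", "second", "then", "next"].any fun ind => PySem.Str.isIn ind (PySem.Str.lower line)) then
    some (PySem.Str.strip (PySem.Str.replace (PySem.Str.replace (PySem.Str.replace (PySem.Str.replace (PySem.Str.replace line
      "Step 2:" "") "2." "") "Second" "") "Then" "") "Next" ""))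
  else if (["step 3", "3.", "third", "finally"].any fun ind => PySem.Str.isIn ind (PySem.Str.lower line)) then
    some (PySem.Str.strip (PySem.Str.replace (PySem.Str.replace (PySem.Str.replace (PySem.Str.replace line
      "Step 3:" "") "3." "") "Third" "") "Finally" ""))
  else none

-- Source B's step dict literal, built at once from the title and the collected body lines
def pvMkStep (t : String) (body : List String) : List (String × String) :=
  [("title", t),
   ("description", body.headD ""),
   ("instructions", PySem.Str.join "" ((body.drop 1).map (fun l => " " ++ l)))]

-- per-line body of B, run over the lines in REVERSE order; state = (steps, body)
def pvCoreB (line : String) (acc : List (List (String × String)) × List String) :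
    List (List (String × String)) × List String :=
  if line == "" then acc
  else
    match pvTitleOf line with
    | none => (acc.1, line :: acc.2)
    | some t => (pvMkStep t acc.2 :: acc.1, [])

def extract_steps_from_response_py_alt (response : String) : List (List (String × String)) :=
  (((PySem.Str.split? response "\n").getD []).foldr
    (fun raw acc => pvCoreB (PySem.Str.strip raw) acc) ([], [])).1

-- ===== PRECONDITION & SPEC =====
def Spec_extract_steps_from_response_py (response : String) (out : List (List (String × String))) : Prop := out = extract_steps_from_response_py_alt response
instance (response : String) (out : List (List (String × String))) : Decidable (Spec_extract_steps_from_response_py response out) := by unfold Spec_extract_steps_from_response_py; infer_instance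

-- ===== CLAIM (what is proved, stated in full; the proofs are below) =====
def Claim_equal_extract_steps_from_response_py : Prop := ∀ (response : String), Dom_extract_steps_from_response_py response → Spec_extract_steps_from_response_py response (extract_steps_from_response_py response)

-- ===== LEMMAS AND PROOFS =====

-- abbreviation for A's current-step dict with its three fixed keys
def pvStep (t d i : String) : PySem.Dict String String :=
  ((PySem.Dict.empty.insert "title" t).insert "description" d).insert "instructions" i

-- A's description/instructions accumulation branch, as a function of the dict
def pvAbsorb1 (c : PySem.Dict String String) (l : String) : PySem.Dict String String :=
  if c.getD "description" "" == "" then c.insert "description" l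
  else c.modify "instructions" "" (fun v => v ++ (" " ++ l))

def pvAbsorb (c : PySem.Dict String String) (body : List String) : PySem.Dict String String :=
  body.foldl pvAbsorb1 c

-- the stripped non-empty lines of rs before its first header line
def pvPre : List String → List String
  | [] => []
  | r :: rs =>
    if PySem.Str.strip r == "" then pvPre rs
    else
      match pvTitleOf (PySem.Str.strip r) with
      | some _ => []
      | none => PySem.Str.strip r :: pvPre rs

-- the common specification: one step per header line, with its following body lines
def pvS : List String → List (List (String × String))
  | [] => []
  | r :: rs =>
    if PySem.Str.strip r == "" then pvS rs
    else
      match pvTitleOf (PySem.Str.strip r) with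
      | none => pvS rs
      | some t => pvMkStep t (pvPre rs) :: pvS rs

-- flush + items, A's postlude
def pvOut (p : List (PySem.Dict String String) × Option (PySem.Dict String String)) :
    List (List (String × String)) :=
  (match p.2 with | some c => p.1 ++ [c] | none => p.1).map PySem.Dict.items

theorem pvPre_cons (r : String) (rs : List String) :
    pvPre (r :: rs) =
      if PySem.Str.strip r == "" then pvPre rs
      else
        match pvTitleOf (PySem.Str.strip r) with
        | some _ => []
        | none => PySem.Str.strip r :: pvPre rs := rfl

theorem pvS_cons (r : String) (rs : List String) :
    pvS (r :: rs) =
      if PySem.Str.strip r == "" then pvS rs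
      else
        match pvTitleOf (PySem.Str.strip r) with
        | none => pvS rs
        | some t => pvMkStep t (pvPre rs) :: pvS rs := rfl

theorem pvJoin_empty_cons (x : String) (xs : List String) :
    PySem.Str.join "" (x :: xs) = x ++ PySem.Str.join "" xs := by
  cases xs with
  | nil => simp [PySem.Str.join]
  | cons h t => simp [PySem.Str.join, PySem.Chars.join_cons_cons]

-- B side: the foldr computes exactly (pvS, pvPre)
theorem pvB_fold (rs : List String) :
    rs.foldr (fun raw acc => pvCoreB (PySem.Str.strip raw) acc) ([], []) = (pvS rs, pvPre rs) := by
  induction rs with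
  | nil => rfl
  | cons r rs ih =>
    rw [List.foldr_cons, ih]
    unfold pvCoreB
    rw [pvS_cons, pvPre_cons]
    by_cases h0 : (PySem.Str.strip r == "") = true
    · rw [if_pos h0, if_pos h0, if_pos h0]
    · rw [if_neg h0, if_neg h0, if_neg h0]
      cases pvTitleOf (PySem.Str.strip r) <;> simp

-- A's per-line body, phrased through pvTitleOf / pvAbsorb1 (same cascade, same order)
theorem pvCoreA_char (steps : List (PySem.Dict String String))
    (cur : Option (PySem.Dict String String)) (line : String) :
    pvCoreA steps cur line =
      if line == "" then (steps, cur)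
      else
        match pvTitleOf line with
        | some t => ((match cur with | some c => steps ++ [c] | none => steps), some (pvStep t "" ""))
        | none =>
          match cur with
          | none => (steps, none)
          | some c => (steps, some (pvAbsorb1 c line)) := by
  unfold pvCoreA pvTitleOf
  by_cases h0 : (line == "") = true
  · rw [if_pos h0, if_pos h0]
  rw [if_neg h0, if_neg h0]
  by_cases h1 : (["step 1", "1.", "first"].any fun ind => PySem.Str.isIn ind (PySem.Str.lower line)) = true
  · rw [if_pos h1, if_pos h1]; rfl
  rw [if_neg h1, if_neg h1]
  by_cases h2 : (["step 2", "2.", "second", "then", "next"].any fun ind => PySem.Str.isIn ind (PySem.Str.lower line)) = true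
  · rw [if_pos h2, if_pos h2]; rfl
  rw [if_neg h2, if_neg h2]
  by_cases h3 : (["step 3", "3.", "third", "finally"].any fun ind => PySem.Str.isIn ind (PySem.Str.lower line)) = true
  · rw [if_pos h3, if_pos h3]; rfl
  rw [if_neg h3, if_neg h3]
  cases cur with
  | none => rfl
  | some c =>
    by_cases hd : (c.getD "description" "" == "") = true <;> simp [pvAbsorb1, hd]

theorem pvAbsorb1_step (t d i l : String) :
    pvAbsorb1 (pvStep t d i) l =
      if (d == "") = true then pvStep t l i else pvStep t d (i ++ (" " ++ l)) := rfl

theorem pvAbsorb_ne (bs : List String) (t d i : String) (hd : ¬ (d == "") = true) :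
    pvAbsorb (pvStep t d i) bs =
      pvStep t d (i ++ PySem.Str.join "" (bs.map (fun l => " " ++ l))) := by
  induction bs generalizing i with
  | nil => simp [pvAbsorb, PySem.Str.join]
  | cons b bs ih =>
    show List.foldl pvAbsorb1 (pvAbsorb1 (pvStep t d i) b) bs = _
    rw [pvAbsorb1_step, if_neg hd]
    rw [show List.foldl pvAbsorb1 (pvStep t d (i ++ (" " ++ b))) bs
          = pvAbsorb (pvStep t d (i ++ (" " ++ b))) bs from rfl]
    rw [ih (i ++ (" " ++ b)), List.map_cons, pvJoin_empty_cons, String.append_assoc]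

theorem pvAbsorb_items (t : String) (bs : List String) (h : ∀ l ∈ bs, ¬ (l == "") = true) :
    (pvAbsorb (pvStep t "" "") bs).items = pvMkStep t bs := by
  cases bs with
  | nil => rfl
  | cons b bs =>
    have hb : ¬ (b == "") = true := h b (by simp)
    show (List.foldl pvAbsorb1 (pvAbsorb1 (pvStep t "" "") b) bs).items = _
    rw [pvAbsorb1_step, if_pos (show (("" : String) == "") = true from rfl)]
    rw [show List.foldl pvAbsorb1 (pvStep t b "") bs = pvAbsorb (pvStep t b "") bs from rfl]
    rw [pvAbsorb_ne bs t b "" hb, String.empty_append]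
    rfl

theorem pvPre_ne (rs : List String) : ∀ l ∈ pvPre rs, ¬ (l == "") = true := by
  induction rs with
  | nil => intro l hl; simp [pvPre] at hl
  | cons r rs ih =>
    intro l hl
    rw [pvPre_cons] at hl
    by_cases h0 : (PySem.Str.strip r == "") = true
    · rw [if_pos h0] at hl; exact ih l hl
    · rw [if_neg h0] at hl
      cases ht : pvTitleOf (PySem.Str.strip r) with
      | some t => simp only [ht] at hl; simp at hl
      | none =>
        simp only [ht] at hl
        rcases List.mem_cons.mp hl with h1 | h1
        · subst h1; exact h0
        · exact ih l h1

-- A side: the forward fold with a mutable current step computes steps-so-far, the absorbed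
-- current step, and then pvS of the remaining lines
theorem pvA_fold (rs : List String) (steps : List (PySem.Dict String String))
    (cur : Option (PySem.Dict String String)) :
    pvOut (rs.foldl (fun acc raw => pvCoreA acc.1 acc.2 (PySem.Str.strip raw)) (steps, cur)) =
      steps.map PySem.Dict.items ++
      (match cur with | none => [] | some c => [(pvAbsorb c (pvPre rs)).items]) ++
      pvS rs := by
  induction rs generalizing steps cur with
  | nil =>
    cases cur <;> simp [pvOut, pvS, pvPre, pvAbsorb]
  | cons r rs ih =>
    rw [List.foldl_cons]
    rw [pvCoreA_char steps cur (PySem.Str.strip r)]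
    rw [pvS_cons, pvPre_cons]
    by_cases h0 : (PySem.Str.strip r == "") = true
    · rw [if_pos h0, if_pos h0, if_pos h0]; exact ih steps cur
    rw [if_neg h0, if_neg h0, if_neg h0]
    cases ht : pvTitleOf (PySem.Str.strip r) with
    | some t =>
      cases cur with
      | none =>
        rw [ih]
        simp [pvAbsorb]
        exact pvAbsorb_items t (pvPre rs) (pvPre_ne rs)
      | some c =>
        rw [ih]
        simp [pvAbsorb]
        exact pvAbsorb_items t (pvPre rs) (pvPre_ne rs)
    | none =>
      cases cur with
      | none => simpa using ih steps none
      | some c => simpa [pvAbsorb] using ih steps (some (pvAbsorb1 c (PySem.Str.strip r)))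

-- ===== VERDICT (by name: the statement is the Claim_ definition above) =====
theorem extract_steps_from_response_py_spec : Claim_equal_extract_steps_from_response_py := by
  intro response _
  unfold Spec_extract_steps_from_response_py extract_steps_from_response_py extract_steps_from_response_py_alt
  rw [pvB_fold]
  have := pvA_fold ((PySem.Str.split? response "\n").getD []) [] none
  simpa [pvOut] using this
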